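-- pv_equiv track=rewrite | github.com/rikulauttia/data-structures-algorithms | week_03/even.py | count_sublists
-- ===== SOURCE A (Python) =====
-- def count_sublists(numbers):
--     result = 0
--
--     even_count = 0
--
--     for num in numbers:
--         if num % 2 == 0:
--             even_count += 1
--             result += even_count
--         else:
--             even_count = 0
--
--     return result
-- ===== SOURCE B (Python) =====
-- def _even_run_lengths(numbers):
--     # two-pointer scan: collect the length of each maximal run of even numbers
--     runs = []
--     i = 0
--     n = len(numbers)
--     while i < n:
--         if numbers[i] % 2 != 0:
--             i += 1
--         else:
--             j = i
--             while j < n and numbers[j] % 2 == 0: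
--                 j += 1
--             runs.append(j - i)
--             i = j
--     return runs
--
-- def count_sublists(numbers):
--     return sum(L * (L + 1) // 2 for L in _even_run_lengths(numbers))
-- ===== Notes on version B (the rewrite author's own statement) =====
-- stated objective: alternative
-- what changed: B first segments the list into maximal runs of even numbers (a two-pointer scan producing run lengths), then sums the closed form L*(L+1)//2 over those lengths, instead of A's single pass with a running even-count accumulator.
import Mathlib
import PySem

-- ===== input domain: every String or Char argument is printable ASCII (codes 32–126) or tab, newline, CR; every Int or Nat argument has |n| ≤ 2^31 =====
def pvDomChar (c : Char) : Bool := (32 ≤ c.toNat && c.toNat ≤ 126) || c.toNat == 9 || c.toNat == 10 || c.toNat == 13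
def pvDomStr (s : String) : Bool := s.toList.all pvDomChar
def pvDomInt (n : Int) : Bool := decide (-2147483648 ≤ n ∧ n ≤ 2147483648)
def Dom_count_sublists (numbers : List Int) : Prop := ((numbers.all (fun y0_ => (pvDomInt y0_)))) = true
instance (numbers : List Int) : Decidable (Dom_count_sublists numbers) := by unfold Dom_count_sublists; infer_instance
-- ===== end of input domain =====

-- B segments the list into maximal even runs and sums the closed form L*(L+1)//2 per run (alternative decomposition, same cost).


-- ===== PORT A =====
-- state = (result, even_count); per element: even -> both advance, odd -> reset even_count
def count_sublists (numbers : List Int) : Int :=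
  (numbers.foldl
    (fun (st : Int × Int) num =>
      if PySem.Int.mod num 2 = 0 then (st.1 + (st.2 + 1), st.2 + 1)
      else (st.1, 0))
    (0, 0)).1

-- ===== PORT B =====
-- _even_run_lengths: the length (as Int, like Python's j - i) of each maximal run of even numbers;
-- the Python two-pointer scan becomes the obvious recursion consuming one odd element or one whole run per step
def evenRunLengths (l : List Int) : List Int :=
  match l with
  | [] => []
  | x :: xs =>
    if PySem.Int.mod x 2 = 0 then
      (((x :: xs).takeWhile (fun n => PySem.Int.mod n 2 == 0)).length : Int) ::
        evenRunLengths ((x :: xs).dropWhile (fun n => PySem.Int.mod n 2 == 0))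
    else
      evenRunLengths xs
termination_by l.length
decreasing_by
  · rename_i hx
    rw [List.dropWhile_cons, if_pos (by simpa using hx)]
    exact Nat.lt_succ_of_le (List.length_dropWhile_le _ _)
  · simp

-- sum(L*(L+1)//2 for L in runs)
def count_sublists_alt (numbers : List Int) : Int :=
  (evenRunLengths numbers).foldl
    (fun acc L => acc + PySem.Int.floordiv (L * (L + 1)) 2) 0

-- ===== PRECONDITION & SPEC =====
def Spec_count_sublists (numbers : List Int) (out : Int) : Prop := out = count_sublists_alt numbers
instance (numbers : List Int) (out : Int) : Decidable (Spec_count_sublists numbers out) := by unfold Spec_count_sublists; infer_instance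

-- ===== CLAIM (what is proved, stated in full; the proofs are below) =====
def Claim_equal_count_sublists : Prop := ∀ (numbers : List Int), Dom_count_sublists numbers → Spec_count_sublists numbers (count_sublists numbers)

-- ===== LEMMAS AND PROOFS =====

-- A's loop body, named for the proofs
def stepA (st : Int × Int) (num : Int) : Int × Int :=
  if PySem.Int.mod num 2 = 0 then (st.1 + (st.2 + 1), st.2 + 1) else (st.1, 0)

-- unfolding equations for evenRunLengths (well-founded definition)
theorem evenRunLengths_nil : evenRunLengths [] = [] := by
  rw [evenRunLengths.eq_def]

theorem evenRunLengths_cons (x : Int) (xs : List Int) : evenRunLengths (x :: xs) =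
    if PySem.Int.mod x 2 = 0 then
      (((x :: xs).takeWhile (fun n => PySem.Int.mod n 2 == 0)).length : Int) ::
        evenRunLengths ((x :: xs).dropWhile (fun n => PySem.Int.mod n 2 == 0))
    else evenRunLengths xs := by
  rw [evenRunLengths.eq_def]

-- triangular number of a Nat, exact (m*(m+1) is even)
def triN (m : Nat) : Int := ((m * (m + 1)) / 2 : Nat)

theorem triN_succ (m : Nat) : triN (m + 1) = triN m + (m + 1) := by
  obtain ⟨k, hk⟩ := Nat.even_mul_succ_self m
  have h1 : m * (m + 1) = 2 * k := by omega
  have h2 : (m + 1) * (m + 1 + 1) = 2 * (k + m + 1) := by nlinarith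
  unfold triN
  rw [h1, h2]
  push_cast [Nat.mul_div_cancel_left _ (by norm_num : 0 < 2)]
  ring

-- B's closed form on a nonnegative Int length agrees with triN
theorem floordiv_tri (m : Nat) : PySem.Int.floordiv ((m : Int) * ((m : Int) + 1)) 2 = triN m := by
  obtain ⟨k, hk⟩ := Nat.even_mul_succ_self m
  have h1 : m * (m + 1) = 2 * k := by omega
  rw [PySem.Int.floordiv_eq_ediv_of_pos (by norm_num)]
  unfold triN
  rw [show ((m : Int) * ((m : Int) + 1)) = ((m * (m + 1) : Nat) : Int) by push_cast; ring, h1]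
  push_cast [Nat.mul_div_cancel_left _ (by norm_num : 0 < 2)]
  omega

-- running A's loop over a run of evens from even_count c adds |t|*c + triN |t| and sets even_count to c + |t|
theorem foldA_evens (t : List Int) (h : ∀ n ∈ t, PySem.Int.mod n 2 = 0) (r c : Int) :
    t.foldl stepA (r, c) = (r + (t.length : Int) * c + triN t.length, c + t.length) := by
  induction t generalizing r c with
  | nil => simp [triN]
  | cons a ts ih =>
    simp only [List.foldl_cons, stepA, if_pos (h a (by simp))]
    rw [ih (fun n hn => h n (by simp [hn])) (r + (c + 1)) (c + 1)]
    simp only [List.length_cons, triN_succ, Prod.mk.injEq]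
    constructor <;> (push_cast; ring)

-- B's fold over the runs list, shifted by an initial accumulator
theorem foldB_shift (rs : List Int) (a : Int) :
    rs.foldl (fun acc L => acc + PySem.Int.floordiv (L * (L + 1)) 2) a
      = a + rs.foldl (fun acc L => acc + PySem.Int.floordiv (L * (L + 1)) 2) 0 := by
  induction rs generalizing a with
  | nil => simp
  | cons x xs ih =>
    simp only [List.foldl_cons]
    rw [ih (a + PySem.Int.floordiv (x * (x + 1)) 2), ih (0 + PySem.Int.floordiv (x * (x + 1)) 2)]
    ring

-- main invariant: A's fold started at even_count 0 computes B's run-based sum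
theorem main (l : List Int) (r : Int) :
    (l.foldl stepA (r, 0)).1 =
      r + (evenRunLengths l).foldl (fun acc L => acc + PySem.Int.floordiv (L * (L + 1)) 2) 0 := by
  match h : l with
  | [] => simp [evenRunLengths_nil]
  | x :: xs =>
    by_cases hx : PySem.Int.mod x 2 = 0
    · set p : Int → Bool := fun n => PySem.Int.mod n 2 == 0 with hp
      have hsplit : (x :: xs).takeWhile p ++ (x :: xs).dropWhile p = x :: xs :=
        List.takeWhile_append_dropWhile
      have hall : ∀ n ∈ (x :: xs).takeWhile p, PySem.Int.mod n 2 = 0 := by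
        intro n hn
        have := List.mem_takeWhile_imp hn
        simpa [hp] using this
      conv_lhs => rw [← hsplit]
      rw [List.foldl_append, foldA_evens _ hall r 0]
      have hdrop : (x :: xs).dropWhile p = xs.dropWhile p := by
        rw [List.dropWhile_cons, if_pos (by simpa [hp] using hx)]
      cases hd : (x :: xs).dropWhile p with
      | nil =>
        simp only [List.foldl_nil]
        rw [evenRunLengths_cons, if_pos hx, hd, evenRunLengths_nil]
        simp only [List.foldl_cons, List.foldl_nil, zero_add, floordiv_tri]
        ring
      | cons y ys =>
        have hy : PySem.Int.mod y 2 ≠ 0 := by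
          have := List.head?_dropWhile_not p (x :: xs)
          rw [hd] at this
          simpa [hp] using this
        have hlen : ys.length < (x :: xs).length := by
          have h1 : ((x :: xs).dropWhile p).length ≤ xs.length := by
            rw [hdrop]; exact List.length_dropWhile_le _ _
          rw [hd] at h1
          simp only [List.length_cons] at h1 ⊢
          omega
        simp only [List.foldl_cons, stepA, if_neg hy]
        rw [main ys (r + (((x :: xs).takeWhile p).length : Int) * 0 + triN ((x :: xs).takeWhile p).length)]
        rw [evenRunLengths_cons, if_pos hx, hd, evenRunLengths_cons, if_neg hy]
        simp only [List.foldl_cons, zero_add]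
        rw [foldB_shift, floordiv_tri]
        rw [foldB_shift (evenRunLengths ys) (triN ((List.takeWhile p (x :: xs)).length))]
        ring
    · simp only [List.foldl_cons, stepA, if_neg hx]
      rw [main xs r, evenRunLengths_cons, if_neg hx]
termination_by l.length
decreasing_by
  · simpa using hlen
  · simp

-- ===== VERDICT (by name: the statement is the Claim_ definition above) =====
theorem count_sublists_spec : Claim_equal_count_sublists := by
  intro numbers _
  unfold Spec_count_sublists count_sublists count_sublists_alt
  have h := main numbers 0
  rw [zero_add] at h
  exact h
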